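-- pv_equiv track=rewrite | github.com/Lerjebo/Advent-of-Code-2019 | Advent_of_code_2019/Day12.py | coord_check
-- ===== SOURCE A (Python) =====
-- def coord_check(coord, values):
--     difference = 0
--     for key in values:
--         if key > coord:
--             difference += 1
--         elif key < coord:
--             difference -= 1
--     return difference
-- ===== SOURCE B (Python) =====
-- def coord_check(coord, values):
--     greater = sum(1 for v in values if v > coord)
--     less = sum(1 for v in values if v < coord)
--     return greater - less
-- ===== Notes on version B (the rewrite author's own statement) =====
-- stated objective: simpler
-- what changed: Replaces the fused accumulator loop with two independent one-line counts (greater and less) combined by a single subtraction.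
import Mathlib
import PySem

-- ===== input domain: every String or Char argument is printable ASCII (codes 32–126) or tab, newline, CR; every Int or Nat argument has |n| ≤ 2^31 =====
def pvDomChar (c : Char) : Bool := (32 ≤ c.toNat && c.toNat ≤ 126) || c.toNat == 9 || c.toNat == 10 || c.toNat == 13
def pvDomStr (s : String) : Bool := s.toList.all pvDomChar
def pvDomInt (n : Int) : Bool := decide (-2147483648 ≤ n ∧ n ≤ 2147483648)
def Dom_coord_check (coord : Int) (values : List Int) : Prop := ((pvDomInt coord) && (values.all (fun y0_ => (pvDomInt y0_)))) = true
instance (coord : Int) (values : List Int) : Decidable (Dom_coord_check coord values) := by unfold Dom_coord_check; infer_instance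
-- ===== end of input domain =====

-- B computes the signed comparison balance as two independent strict counts (greater, less) subtracted, instead of A's fused if/elif accumulator loop; same O(n) cost, simpler decomposition.


-- ===== PORT A =====
def coord_check (coord : Int) (values : List Int) : Int :=
  values.foldl (fun difference key =>
    if key > coord then difference + 1
    else if key < coord then difference - 1
    else difference) 0

-- ===== PORT B =====
def coord_check_alt (coord : Int) (values : List Int) : Int :=
  let greater : Int := ((values.filter (fun v => v > coord)).map (fun _ => (1 : Int))).sum
  let less : Int := ((values.filter (fun v => v < coord)).map (fun _ => (1 : Int))).sum
  greater - less

-- ===== PRECONDITION & SPEC =====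
def Spec_coord_check (coord : Int) (values : List Int) (out : Int) : Prop := out = coord_check_alt coord values
instance (coord : Int) (values : List Int) (out : Int) : Decidable (Spec_coord_check coord values out) := by unfold Spec_coord_check; infer_instance

-- ===== CLAIM (what is proved, stated in full; the proofs are below) =====
def Claim_equal_coord_check : Prop := ∀ (coord : Int) (values : List Int), Dom_coord_check coord values → Spec_coord_check coord values (coord_check coord values)

-- ===== LEMMAS AND PROOFS =====
theorem coord_check_foldl_shift (coord : Int) (values : List Int) (d : Int) :
    values.foldl (fun difference key =>
      if key > coord then difference + 1
      else if key < coord then difference - 1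
      else difference) d = d + coord_check_alt coord values := by
  induction values generalizing d with
  | nil => simp [coord_check_alt]
  | cons x xs ih =>
    simp only [List.foldl_cons]
    rw [ih]
    simp only [coord_check_alt, List.filter_cons]
    split_ifs with h1 h2 <;> simp_all <;> omega

-- ===== VERDICT (by name: the statement is the Claim_ definition above) =====
theorem coord_check_spec : Claim_equal_coord_check := by
  intro coord values _
  unfold Spec_coord_check coord_check
  rw [coord_check_foldl_shift]
  ring
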